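-- pv_equiv track=rewrite | github.com/shravyamiri/Bootcamp | Day4/level_4/stream_processing_level4.py | join_pairs_processor
-- ===== SOURCE A (Python) =====
-- from typing import Iterator, Callable, Dict, Any
--
-- def join_pairs_processor(lines: Iterator[str]) -> Iterator[str]:
--     """Joins every two consecutive lines."""
--     line1 = None
--     for line in lines:
--         if line1 is None:
--             line1 = line
--         else:
--             yield f"{line1} {line}"
--             line1 = None
--     if line1 is not None:
--         # Handle odd number of lines, maybe emit the last one as is or with a marker
--         yield f"孤立行: {line1}"
-- ===== SOURCE B (Python) =====
-- def join_pairs_processor(lines):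
--     """Joins every two consecutive lines (materialize, then index pairs by arithmetic)."""
--     buf = list(lines)
--     n = len(buf)
--     result = [f"{buf[2 * i]} {buf[2 * i + 1]}" for i in range(n // 2)]
--     if n % 2:
--         result.append(f"孤立行: {buf[-1]}")
--     yield from result
-- ===== Notes on version B (the rewrite author's own statement) =====
-- stated objective: alternative
-- what changed: Replaced the streaming None-sentinel state machine with a staged computation: materialize the input, build the n//2 joined pairs by index arithmetic over range(n//2), and append the lone-line marker when n is odd.
import Mathlib
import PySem

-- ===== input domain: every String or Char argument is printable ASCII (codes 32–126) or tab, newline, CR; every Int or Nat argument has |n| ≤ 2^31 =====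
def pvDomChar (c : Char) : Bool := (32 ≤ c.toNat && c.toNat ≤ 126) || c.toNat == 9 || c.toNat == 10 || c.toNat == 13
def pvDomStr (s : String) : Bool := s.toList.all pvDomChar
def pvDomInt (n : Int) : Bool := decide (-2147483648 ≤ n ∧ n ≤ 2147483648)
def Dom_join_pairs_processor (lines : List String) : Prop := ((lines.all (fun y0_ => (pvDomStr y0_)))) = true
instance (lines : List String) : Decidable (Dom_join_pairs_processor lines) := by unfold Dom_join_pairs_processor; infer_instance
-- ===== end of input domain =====

-- B replaces A's streaming None-sentinel state machine by a staged indexed computation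
-- (materialize, build the n//2 pairs by index arithmetic over range(n//2), append the odd-line marker); alternative, same cost.

-- ===== PORT A =====
-- A's generator loop: fold over the lines carrying (emitted lines, pending line1 : Option String), then flush the pending line
def pvStepA (st : List String × Option String) (line : String) : List String × Option String :=
  match st.2 with
  | none => (st.1, some line)
  | some l1 => (st.1 ++ [l1 ++ " " ++ line], none)

def join_pairs_processor (lines : List String) : List String :=
  let s := lines.foldl pvStepA ([], none)
  match s.2 with
  | none => s.1
  | some l1 => s.1 ++ ["孤立行: " ++ l1]

-- ===== PORT B =====
-- staged: n = len(buf); pairs buf[2*i] + " " + buf[2*i+1] for i in range(n // 2); marker from buf[-1] if n odd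
def join_pairs_processor_alt (lines : List String) : List String :=
  let n : Int := lines.length
  let result := (PySem.List.pyRange 0 (PySem.Int.floordiv n 2) 1).map
    (fun i => PySem.List.pyGetD lines (2 * i) "" ++ " " ++ PySem.List.pyGetD lines (2 * i + 1) "")
  if PySem.Int.mod n 2 ≠ 0 then result ++ ["孤立行: " ++ PySem.List.pyGetD lines (-1) ""]
  else result

-- ===== PRECONDITION & SPEC =====
def Spec_join_pairs_processor (lines : List String) (out : List String) : Prop := out = join_pairs_processor_alt lines
instance (lines : List String) (out : List String) : Decidable (Spec_join_pairs_processor lines out) := by unfold Spec_join_pairs_processor; infer_instance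

-- ===== CLAIM (what is proved, stated in full; the proofs are below) =====
def Claim_equal_join_pairs_processor : Prop := ∀ (lines : List String), Dom_join_pairs_processor lines → Spec_join_pairs_processor lines (join_pairs_processor lines)

-- ===== LEMMAS AND PROOFS =====

-- proof-side structural recursion both ports are reduced to
def pvPairRec : List String → List String
  | [] => []
  | [l] => ["孤立行: " ++ l]
  | a :: b :: rest => (a ++ " " ++ b) :: pvPairRec rest

-- A-side loop invariant: flushing A's fold from state (acc, opt) yields acc ++ pvPairRec (opt.toList ++ lines)
theorem pvJoinAuxA (lines : List String) : ∀ (acc : List String) (opt : Option String),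
    (match lines.foldl pvStepA (acc, opt) with
     | (res, none) => res
     | (res, some l1) => res ++ ["孤立行: " ++ l1])
    = acc ++ pvPairRec (opt.toList ++ lines) := by
  induction lines with
  | nil =>
    intro acc opt
    cases opt with
    | none => simp [pvPairRec]
    | some l1 => simp [pvPairRec]
  | cons line rest ih =>
    intro acc opt
    cases opt with
    | none =>
      simpa [pvStepA] using ih acc (some line)
    | some l1 =>
      have h := ih (acc ++ [l1 ++ " " ++ line]) none
      simp only [List.foldl_cons, pvStepA] at *
      rw [h]
      simp [pvPairRec]

theorem pvA_eq_pairRec (lines : List String) : join_pairs_processor lines = pvPairRec lines := by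
  unfold join_pairs_processor
  have h := pvJoinAuxA lines [] none
  simp only [Option.toList, List.nil_append] at h
  rcases hp : lines.foldl pvStepA ([], none) with ⟨res, o⟩
  rw [hp] at h
  cases o <;> simpa using h

-- B-side: B's Int-indexed computation restated with Nat indices
theorem pvB_nat (xs : List String) :
    join_pairs_processor_alt xs =
      (List.range (xs.length / 2)).map
        (fun k => xs.getD (2 * k) "" ++ " " ++ xs.getD (2 * k + 1) "") ++
      (if xs.length % 2 ≠ 0 then ["孤立行: " ++ (xs.getLast?.getD "")] else []) := by
  unfold join_pairs_processor_alt
  have h2 : PySem.Int.floordiv (xs.length : Int) 2 = ((xs.length / 2 : Nat) : Int) := by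
    rw [PySem.Int.floordiv_eq_ediv_of_pos (by norm_num)]; omega
  have h3 : PySem.Int.mod (xs.length : Int) 2 = ((xs.length % 2 : Nat) : Int) := by
    rw [PySem.Int.mod_eq_emod_of_pos (by norm_num)]; omega
  have hmap : ∀ (k : Nat),
      PySem.List.pyGetD xs (2 * (k : Int)) "" ++ " " ++ PySem.List.pyGetD xs (2 * (k : Int) + 1) ""
        = xs.getD (2 * k) "" ++ " " ++ xs.getD (2 * k + 1) "" := by
    intro k
    have e1 : (2 : Int) * (k : Int) = ((2 * k : Nat) : Int) := by push_cast; ring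
    have e2 : (2 : Int) * (k : Int) + 1 = ((2 * k + 1 : Nat) : Int) := by push_cast; ring
    rw [e2, e1]
    simp only [PySem.List.pyGetD_natCast]
  simp only [h2, h3, PySem.List.pyRange_zero_natCast, List.map_map, Function.comp_def, hmap]
  by_cases hm : xs.length % 2 = 0
  · simp [hm]
  · have hne : xs ≠ [] := by intro h; subst h; simp at hm
    rw [PySem.List.pyGetD_neg_one (h := hne)]
    have hc : ((xs.length : Int)) % 2 = 1 := by omega
    have hg : xs.getLast?.getD "" = xs.getLast hne := by
      rw [List.getLast?_eq_some_getLast (h := hne)]; rfl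
    simp [hc, hg]
    omega

-- the Nat-indexed form is pvPairRec
theorem pvNat_eq_pairRec : ∀ xs : List String,
    (List.range (xs.length / 2)).map
        (fun k => xs.getD (2 * k) "" ++ " " ++ xs.getD (2 * k + 1) "") ++
      (if xs.length % 2 ≠ 0 then ["孤立行: " ++ xs.getLast?.getD ""] else [])
      = pvPairRec xs := by
  intro xs
  induction xs using pvPairRec.induct with
  | case1 => simp [pvPairRec]
  | case2 l => simp [pvPairRec]
  | case3 a b rest ih =>
    have hdiv : (a :: b :: rest).length / 2 = rest.length / 2 + 1 := by simp; omega
    have hmod : (a :: b :: rest).length % 2 = rest.length % 2 := by simp; omega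
    rw [hdiv, hmod, List.range_succ_eq_map]
    simp only [List.map_cons, List.map_map, Function.comp_def, Nat.succ_eq_add_one]
    have hhead : (a :: b :: rest).getD (2 * 0) "" ++ " " ++ (a :: b :: rest).getD (2 * 0 + 1) ""
        = a ++ " " ++ b := by simp
    have hf : ∀ k : Nat,
        (a :: b :: rest).getD (2 * (k + 1)) "" ++ " " ++ (a :: b :: rest).getD (2 * (k + 1) + 1) ""
          = rest.getD (2 * k) "" ++ " " ++ rest.getD (2 * k + 1) "" := by
      intro k
      have e1 : 2 * (k + 1) = (2 * k + 1) + 1 := by omega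
      have e2 : 2 * (k + 1) + 1 = (2 * k + 1 + 1) + 1 := by omega
      rw [e2, e1]
      simp
    by_cases hr : rest = []
    · subst hr; simp [pvPairRec]
    · have hgl : (a :: b :: rest).getLast? = rest.getLast? := by
        cases rest with
        | nil => exact absurd rfl hr
        | cons c cs => simp
      rw [hgl]
      simp only [hhead, hf, List.cons_append, pvPairRec]
      rw [ih]

-- ===== VERDICT (by name: the statement is the Claim_ definition above) =====
theorem join_pairs_processor_spec : Claim_equal_join_pairs_processor := by
  intro lines _
  unfold Spec_join_pairs_processor
  rw [pvA_eq_pairRec, pvB_nat, pvNat_eq_pairRec]
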